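-- pv_equiv track=rewrite | github.com/cbguder/advent-of-code | 2023/25/part1.py | find_connected
-- ===== SOURCE A (Python) =====
-- def find_connected(neighbors, start, removed):
--     seen = set()
--     queue = [start]
--
--     while queue:
--         cur = queue.pop()
--         if cur in seen:
--             continue
--         seen.add(cur)
--
--         for n in neighbors[cur]:
--             if tuple(sorted([cur, n])) not in removed:
--                 queue.append(n)
--
--     return seen
-- ===== SOURCE B (Python) =====
-- def find_connected(neighbors, start, removed):
--     # Explicit DFS with a stack of (node, pending-neighbours) frames, marking
--     # nodes as seen when they are first pushed; A instead stacks raw nodes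
--     # (with duplicates) and filters already-seen nodes when popping.
--     seen = {start}
--     stack = [(start, list(neighbors[start]))]
--
--     while stack:
--         cur, pending = stack[-1]
--         if not pending:
--             stack.pop()
--             continue
--         n = pending.pop()
--         if (min(cur, n), max(cur, n)) not in removed and n not in seen:
--             seen.add(n)
--             stack.append((n, list(neighbors[n])))
--
--     return seen
-- ===== Notes on version B (the rewrite author's own statement) =====
-- stated objective: alternative
-- what changed: Replaces A's stack of raw nodes (which holds duplicates and re-checks seen on every pop) by a stack of (node, pending-neighbours) DFS frames where a node is marked seen at push time, so each node enters the stack at most once; the edge test uses (min, max) instead of tuple(sorted([...])).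
import Mathlib
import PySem

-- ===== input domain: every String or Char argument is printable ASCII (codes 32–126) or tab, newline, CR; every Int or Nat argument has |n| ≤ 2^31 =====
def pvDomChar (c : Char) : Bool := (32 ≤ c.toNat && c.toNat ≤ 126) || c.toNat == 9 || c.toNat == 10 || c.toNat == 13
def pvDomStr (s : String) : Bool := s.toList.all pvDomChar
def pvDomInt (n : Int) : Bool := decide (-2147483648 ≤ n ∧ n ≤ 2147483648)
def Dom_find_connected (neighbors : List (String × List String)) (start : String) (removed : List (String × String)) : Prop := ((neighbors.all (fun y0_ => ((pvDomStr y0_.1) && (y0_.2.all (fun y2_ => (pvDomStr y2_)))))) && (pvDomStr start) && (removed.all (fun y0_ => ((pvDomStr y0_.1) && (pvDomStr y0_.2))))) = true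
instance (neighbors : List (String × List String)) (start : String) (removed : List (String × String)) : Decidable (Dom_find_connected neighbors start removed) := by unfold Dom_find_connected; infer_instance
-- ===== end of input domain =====

-- B replaces A's stack of raw nodes (duplicates allowed, seen-check at pop) by a stack of
-- (node, pending-neighbours) DFS frames with nodes marked seen when pushed; return value only —
-- the Python return is a set, both ports represent it as the list of distinct nodes in
-- discovery order. String comparisons are done on .toList (Python's code-point order,
-- kernel-reducible; PYSEM.md: s < t on str IS < on s.toList).

-- ===== PORT A =====
-- tuple(sorted([cur, n]))
def pvEdgeKey (cur n : String) : String × String :=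
  match PySem.List.sorted [cur, n] (fun x => x.toList) false with
  | [a, b] => (a, b)
  | _ => (cur, n)   -- unreachable: sorting a 2-element list yields 2 elements

-- tuple(sorted([cur, n])) not in removed
def pvKeep (removed : List (String × String)) (cur n : String) : Bool :=
  !(removed.contains (pvEdgeKey cur n))

-- neighbors[cur]: first matching key; a missing key is Python's KeyError, excluded by
-- Pre_find_connected, so the [] default is never reached on admitted inputs
def pvAdj (neighbors : List (String × List String)) (cur : String) : List String :=
  ((neighbors.find? (fun p => p.1 == cur)).map Prod.snd).getD []

-- every node the traversal can ever touch, and the total number of adjacency entries;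
-- used only to compute a fuel bound on the number of loop iterations (proved sufficient below)
def pvV (neighbors : List (String × List String)) (start : String) : List String :=
  start :: neighbors.flatMap (fun p => p.2)
def pvT (neighbors : List (String × List String)) : Nat :=
  (neighbors.flatMap (fun p => p.2)).length

-- while queue: cur = queue.pop(); if cur in seen: continue; seen.add(cur);
--   for n in neighbors[cur]: if tuple(sorted([cur,n])) not in removed: queue.append(n)
def pvLoopA (neighbors : List (String × List String)) (removed : List (String × String)) :
    Nat → List String → List String → List String
  | 0, seen, _ => seen
  | fuel+1, seen, queue =>
    match PySem.List.pop? queue (-1) with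
    | none => seen
    | some (cur, rest) =>
      if seen.contains cur then pvLoopA neighbors removed fuel seen rest
      else pvLoopA neighbors removed fuel (PySem.Set.add seen cur)
             (rest ++ (pvAdj neighbors cur).filter (fun n => pvKeep removed cur n))

def find_connected (neighbors : List (String × List String)) (start : String) (removed : List (String × String)) : List String :=
  pvLoopA neighbors removed ((pvV neighbors start).length * (pvT neighbors + 2) + 2) [] [start]

-- ===== PORT B =====
-- min(cur, n) / max(cur, n): Python min/max of two strings
def pvMinS (cur n : String) : String := if n.toList < cur.toList then n else cur
def pvMaxS (cur n : String) : String := if cur.toList < n.toList then n else cur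

-- (min(cur, n), max(cur, n)) not in removed
def pvKeepB (removed : List (String × String)) (cur n : String) : Bool :=
  !(removed.contains (pvMinS cur n, pvMaxS cur n))

-- neighbors[n] (dict lookup; missing key = KeyError, excluded by Pre_find_connected)
def pvAdjB (neighbors : List (String × List String)) (cur : String) : List String :=
  (PySem.Dict.get? ⟨neighbors⟩ cur).getD []

-- fuel bound on the number of machine steps (each step pops a pending entry or an
-- exhausted frame; proved sufficient below)
def pvFuelB (neighbors : List (String × List String)) (start : String) : Nat :=
  (start :: neighbors.flatMap (fun p => p.2)).length *
    ((neighbors.flatMap (fun p => p.2)).length + 2) +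
    (neighbors.flatMap (fun p => p.2)).length + 3

-- while stack: cur, pending = stack[-1]; if not pending: stack.pop(); continue;
--   n = pending.pop();
--   if (min(cur,n), max(cur,n)) not in removed and n not in seen:
--     seen.add(n); stack.append((n, list(neighbors[n])))
-- (the Python stack grows at its right end; it is modelled top-at-head, value-faithfully)
def pvRunB (neighbors : List (String × List String)) (removed : List (String × String)) :
    Nat → List String → List (String × List String) → List String
  | 0, seen, _ => seen
  | fuel+1, seen, stack =>
    match stack with
    | [] => seen
    | (cur, pending) :: frames =>
      match PySem.List.pop? pending (-1) with
      | none => pvRunB neighbors removed fuel seen frames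
      | some (n, pending') =>
        if pvKeepB removed cur n && !(seen.contains n) then
          pvRunB neighbors removed fuel (PySem.Set.add seen n)
            ((n, pvAdjB neighbors n) :: (cur, pending') :: frames)
        else
          pvRunB neighbors removed fuel seen ((cur, pending') :: frames)

def find_connected_alt (neighbors : List (String × List String)) (start : String) (removed : List (String × String)) : List String :=
  pvRunB neighbors removed (pvFuelB neighbors start)
    (PySem.Set.ofList [start]) [(start, pvAdjB neighbors start)]

-- ===== PRECONDITION & SPEC =====
-- Pre_ helpers: the sorted-pair edge test and the saturation
-- closure of "reachable from start along kept edges through key nodes".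
def pvPreKeep (removed : List (String × String)) (u n : String) : Bool :=
  !(removed.contains (if n.toList < u.toList then (n, u) else (u, n)))
def pvGrow (neighbors : List (String × List String)) (removed : List (String × String))
    (S : List String) : List String :=
  S.foldl (fun acc u =>
    ((pvAdj neighbors u).filter (fun n => pvPreKeep removed u n)).foldl PySem.Set.add acc) S
def pvReach (neighbors : List (String × List String)) (start : String)
    (removed : List (String × String)) : List String :=
  (pvGrow neighbors removed)^[(neighbors.flatMap (fun p => p.2)).length + 1] [start]

-- Pre_ admits exactly the inputs on which A returns: A raises KeyError iff some node
-- reachable from start along kept edges (through key nodes) is missing from neighbors;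
-- pvReach is the standard round-based saturation closure of that edge relation, not either
-- port's traversal (no stack, no recursion, no seen bookkeeping).
def Pre_find_connected (neighbors : List (String × List String)) (start : String) (removed : List (String × String)) : Prop :=
  (pvReach neighbors start removed).all (fun v => (neighbors.map Prod.fst).contains v) = true
instance (neighbors : List (String × List String)) (start : String) (removed : List (String × String)) : Decidable (Pre_find_connected neighbors start removed) := by
  unfold Pre_find_connected; infer_instance

def pvWitness_find_connected : (List (String × List String)) × String × (List (String × String)) :=
  ([("a", ["b"]), ("b", ["a"])], "a", [("a", "b")])

def Spec_find_connected (neighbors : List (String × List String)) (start : String) (removed : List (String × String)) (out : List String) : Prop := out = find_connected_alt neighbors start removed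
instance (neighbors : List (String × List String)) (start : String) (removed : List (String × String)) (out : List String) : Decidable (Spec_find_connected neighbors start removed out) := by unfold Spec_find_connected; infer_instance

-- ===== CLAIM (what is proved, stated in full; the proofs are below) =====
def Claim_equal_find_connected : Prop := ∀ (neighbors : List (String × List String)) (start : String) (removed : List (String × String)), Dom_find_connected neighbors start removed → Pre_find_connected neighbors start removed → Spec_find_connected neighbors start removed (find_connected neighbors start removed)

-- ===== LEMMAS AND PROOFS =====

-- recursive DFS used only as the common reference point of the two simulation proofs
def pvVisitOld (neighbors : List (String × List String)) (removed : List (String × String)) :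
    Nat → List String → String → List String
  | 0, seen, _ => seen
  | fuel+1, seen, cur =>
    if seen.contains cur then seen
    else ((pvAdj neighbors cur).reverse).foldl
           (fun acc n => if pvKeep removed cur n then pvVisitOld neighbors removed fuel acc n else acc)
           (PySem.Set.add seen cur)

-- the measure: how many nodes of V are not yet seen
def pvMV (V s : List String) : Nat := V.countP (fun x => !(s.contains x))

-- weight of the frame stack: one unit per frame plus one per pending entry
def pvSW (st : List (String × List String)) : Nat := (st.map (fun f => f.2.length + 1)).sum

theorem pv_pop_nil : PySem.List.pop? ([] : List String) (-1) = none := by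
  simp [PySem.List.pop?]

theorem pv_pop_concat (q : List String) (x : String) :
    PySem.List.pop? (q ++ [x]) (-1) = some (x, q) := PySem.List.pop?_last q x

theorem pv_add_fresh (s : List String) (x : String) (h : s.contains x = false) :
    PySem.Set.add s x = s ++ [x] := by
  simp only [PySem.Set.add]
  rw [if_neg]
  simpa using h

theorem pvAdj_subset (ns : List (String × List String)) (c n : String)
    (h : n ∈ pvAdj ns c) : n ∈ ns.flatMap (fun p => p.2) := by
  unfold pvAdj at h
  cases hf : ns.find? (fun p => p.1 == c) with
  | none => rw [hf] at h; simp at h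
  | some p =>
    rw [hf] at h
    simp only [Option.map_some, Option.getD_some] at h
    exact List.mem_flatMap.mpr ⟨p, List.mem_of_find?_eq_some hf, h⟩

theorem pvAdj_len (ns : List (String × List String)) (c : String) :
    (pvAdj ns c).length ≤ pvT ns := by
  unfold pvAdj pvT
  cases hf : ns.find? (fun p => p.1 == c) with
  | none => simp
  | some p =>
    simp only [Option.map_some, Option.getD_some]
    have hp : p ∈ ns := List.mem_of_find?_eq_some hf
    clear hf
    induction ns with
    | nil => cases hp
    | cons a t ih =>
      rcases List.mem_cons.mp hp with rfl | hp'
      · simp only [List.flatMap_cons, List.length_append]; omega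
      · have := ih hp'; simp only [List.flatMap_cons, List.length_append]; omega

theorem pv_countP_lt (p q : String → Bool) (x : String) :
    ∀ (l : List String), (∀ a ∈ l, p a = true → q a = true) →
      x ∈ l → p x = false → q x = true → l.countP p < l.countP q := by
  intro l
  induction l with
  | nil => intro _ hx; cases hx
  | cons a t ih =>
    intro h hx hpx hqx
    have hmono : t.countP p ≤ t.countP q :=
      List.countP_mono_left (fun a ha => h a (List.mem_cons_of_mem _ ha))
    rw [List.countP_cons, List.countP_cons]
    rcases List.mem_cons.mp hx with rfl | hx'
    · rw [hpx, hqx]; simp; omega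
    · have := ih (fun a ha => h a (List.mem_cons_of_mem _ ha)) hx' hpx hqx
      by_cases hpa : p a = true
      · rw [hpa, h a (List.mem_cons_self ..) hpa]; simp; omega
      · rw [Bool.not_eq_true] at hpa
        rw [hpa]
        cases hqa : q a <;> simp <;> omega

theorem pvMV_mono (V s u : List String) : pvMV V (s ++ u) ≤ pvMV V s := by
  unfold pvMV
  refine List.countP_mono_left (fun a _ hp => ?_)
  simp at hp ⊢
  exact hp.1

theorem pvMV_prefix (V s t : List String) (h : s <+: t) : pvMV V t ≤ pvMV V s := by
  obtain ⟨u, rfl⟩ := h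
  exact pvMV_mono V s u

theorem pvMV_concat_lt (V s : List String) (x : String)
    (hx : x ∈ V) (hs : s.contains x = false) : pvMV V (s ++ [x]) < pvMV V s := by
  unfold pvMV
  refine pv_countP_lt _ _ x V (fun a _ hp => ?_) hx (by simp) (by simpa using hs)
  simp at hp ⊢
  exact hp.1

theorem pvMV_nil (V : List String) : pvMV V [] = V.length := by
  unfold pvMV
  simp

theorem visitOld_prefix (ns : List (String × List String)) (rm : List (String × String)) :
    ∀ (g : Nat) (s : List String) (cur : String), s <+: pvVisitOld ns rm g s cur := by
  intro g
  induction g with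
  | zero => intro s cur; exact List.prefix_refl s
  | succ g ih =>
    intro s cur
    show s <+: pvVisitOld ns rm (g+1) s cur
    unfold pvVisitOld
    by_cases h : s.contains cur
    · simp only [h, if_true]
      exact List.prefix_refl s
    · simp only [h]
      have hstep : s <+: PySem.Set.add s cur := by
        rw [pv_add_fresh s cur (by simpa using h)]
        exact List.prefix_append s [cur]
      have hfold : ∀ (l : List String) (a : List String),
          a <+: l.foldl (fun acc n => if pvKeep rm cur n then pvVisitOld ns rm g acc n else acc) a := by
        intro l
        induction l with
        | nil => intro a; exact List.prefix_refl a
        | cons n t iht =>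
          intro a
          simp only [List.foldl_cons]
          refine List.IsPrefix.trans ?_ (iht _)
          by_cases hk : pvKeep rm cur n = true
          · rw [if_pos hk]; exact ih a n
          · rw [if_neg hk]
      exact hstep.trans (hfold _ _)

theorem visitOld_stable (ns : List (String × List String)) (rm : List (String × String))
    (V : List String) (hV : ∀ n ∈ ns.flatMap (fun p => p.2), n ∈ V) :
    ∀ (k g g' : Nat) (s : List String) (cur : String), cur ∈ V →
      pvMV V s ≤ k → pvMV V s < g → pvMV V s < g' →
      pvVisitOld ns rm g s cur = pvVisitOld ns rm g' s cur := by
  intro k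
  induction k with
  | zero =>
    intro g g' s cur hcur hk hg hg'
    have h0 : pvMV V s = 0 := Nat.le_zero.mp hk
    have hc : s.contains cur = true := by
      by_contra hc
      have := pvMV_concat_lt V s cur hcur (by simpa using hc)
      omega
    obtain ⟨g0, rfl⟩ : ∃ g0, g = g0 + 1 := ⟨g - 1, by omega⟩
    obtain ⟨g0', rfl⟩ : ∃ g0', g' = g0' + 1 := ⟨g' - 1, by omega⟩
    simp only [pvVisitOld]
    rw [if_pos hc, if_pos hc]
  | succ k ih =>
    intro g g' s cur hcur hk hg hg'
    obtain ⟨g0, rfl⟩ : ∃ g0, g = g0 + 1 := ⟨g - 1, by omega⟩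
    obtain ⟨g0', rfl⟩ : ∃ g0', g' = g0' + 1 := ⟨g' - 1, by omega⟩
    simp only [pvVisitOld]
    by_cases hc : s.contains cur = true
    · rw [if_pos hc, if_pos hc]
    · rw [if_neg hc, if_neg hc, pv_add_fresh s cur (by simpa using hc)]
      have hlt : pvMV V (s ++ [cur]) < pvMV V s :=
        pvMV_concat_lt V s cur hcur (by simpa using hc)
      have key : ∀ (l : List String), (∀ n ∈ l, n ∈ V) →
          ∀ (a : List String), pvMV V a ≤ pvMV V (s ++ [cur]) →
          l.foldl (fun acc n => if pvKeep rm cur n then pvVisitOld ns rm g0 acc n else acc) a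
            = l.foldl (fun acc n => if pvKeep rm cur n then pvVisitOld ns rm g0' acc n else acc) a := by
        intro l
        induction l with
        | nil => intro _ a _; rfl
        | cons n t iht =>
          intro hl a ha
          have hn : n ∈ V := hl n (List.mem_cons_self ..)
          have hl' : ∀ m ∈ t, m ∈ V := fun m hm => hl m (List.mem_cons_of_mem _ hm)
          simp only [List.foldl_cons]
          by_cases hk2 : pvKeep rm cur n = true
          · rw [if_pos hk2, if_pos hk2]
            have heq : pvVisitOld ns rm g0 a n = pvVisitOld ns rm g0' a n :=
              ih g0 g0' a n hn (by omega) (by omega) (by omega)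
            rw [heq]
            refine iht hl' _ ?_
            exact le_trans (pvMV_prefix V a _ (visitOld_prefix ns rm g0' a n)) ha
          · rw [if_neg hk2, if_neg hk2]
            exact iht hl' a ha
      exact key _ (fun n hn => hV n (pvAdj_subset ns cur n (List.mem_reverse.mp hn))) _ (le_refl _)

theorem foldVisit_stable (ns : List (String × List String)) (rm : List (String × String))
    (V : List String) (hV : ∀ n ∈ ns.flatMap (fun p => p.2), n ∈ V)
    (g g' : Nat) :
    ∀ (l : List String) (a : List String), (∀ n ∈ l, n ∈ V) →
      pvMV V a < g → pvMV V a < g' →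
      l.foldl (fun acc n => pvVisitOld ns rm g acc n) a
        = l.foldl (fun acc n => pvVisitOld ns rm g' acc n) a := by
  intro l
  induction l with
  | nil => intro a _ _ _; rfl
  | cons n t iht =>
    intro a hl hg hg'
    have hn : n ∈ V := hl n (List.mem_cons_self ..)
    simp only [List.foldl_cons]
    have heq : pvVisitOld ns rm g a n = pvVisitOld ns rm g' a n :=
      visitOld_stable ns rm V hV (pvMV V a) g g' a n hn (le_refl _) hg hg'
    rw [heq]
    have hmv : pvMV V (pvVisitOld ns rm g' a n) ≤ pvMV V a :=
      pvMV_prefix V a _ (visitOld_prefix ns rm g' a n)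
    exact iht _ (fun m hm => hl m (List.mem_cons_of_mem _ hm)) (by omega) (by omega)

theorem foldVisit_filter (ns : List (String × List String)) (rm : List (String × String))
    (g : Nat) (cur : String) (l a : List String) :
    l.reverse.foldl (fun acc n => if pvKeep rm cur n then pvVisitOld ns rm g acc n else acc) a
      = ((l.filter (fun n => pvKeep rm cur n)).reverse).foldl (fun acc n => pvVisitOld ns rm g acc n) a := by
  rw [← List.filter_reverse]
  generalize l.reverse = m
  induction m generalizing a with
  | nil => rfl
  | cons n t iht =>
    simp only [List.foldl_cons, List.filter_cons]
    by_cases hk : pvKeep rm cur n = true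
    · rw [if_pos hk, if_pos hk]
      simp only [List.foldl_cons]
      exact iht _
    · rw [if_neg hk, if_neg hk]
      exact iht _

theorem loopA_nil (ns : List (String × List String)) (rm : List (String × String))
    (f : Nat) (s : List String) : pvLoopA ns rm f s [] = s := by
  cases f with
  | zero => rfl
  | succ f => simp [pvLoopA, pv_pop_nil]

theorem loopA_stable (ns : List (String × List String)) (rm : List (String × String))
    (V : List String) (hV : ∀ n ∈ ns.flatMap (fun p => p.2), n ∈ V) :
    ∀ (k g g' : Nat) (s q : List String), (∀ x ∈ q, x ∈ V) →
      pvMV V s * (pvT ns + 2) + q.length ≤ k →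
      pvMV V s * (pvT ns + 2) + q.length < g →
      pvMV V s * (pvT ns + 2) + q.length < g' →
      pvLoopA ns rm g s q = pvLoopA ns rm g' s q := by
  intro k
  induction k with
  | zero =>
    intro g g' s q hq hk _ _
    have hq0 : q = [] := List.eq_nil_of_length_eq_zero (by omega)
    subst hq0
    rw [loopA_nil, loopA_nil]
  | succ k ih =>
    intro g g' s q hq hk hg hg'
    rcases List.eq_nil_or_concat q with rfl | ⟨q', x, rfl⟩
    · rw [loopA_nil, loopA_nil]
    · simp only [List.concat_eq_append] at hq hk hg hg' ⊢
      have hx : x ∈ V := hq x (by simp)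
      have hq' : ∀ y ∈ q', y ∈ V := fun y hy => hq y (by simp [hy])
      have hlen : (q' ++ [x]).length = q'.length + 1 := by simp
      obtain ⟨g0, rfl⟩ : ∃ g0, g = g0 + 1 := ⟨g - 1, by omega⟩
      obtain ⟨g0', rfl⟩ : ∃ g0', g' = g0' + 1 := ⟨g' - 1, by omega⟩
      simp only [pvLoopA, pv_pop_concat]
      by_cases hc : s.contains x = true
      · rw [if_pos hc, if_pos hc]
        exact ih g0 g0' s q' hq' (by omega) (by omega) (by omega)
      · rw [if_neg hc, if_neg hc, pv_add_fresh s x (by simpa using hc)]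
        have hlt : pvMV V (s ++ [x]) < pvMV V s :=
          pvMV_concat_lt V s x hx (by simpa using hc)
        have hch : ((pvAdj ns x).filter (fun n => pvKeep rm x n)).length ≤ pvT ns :=
          le_trans (List.length_filter_le _ _) (pvAdj_len ns x)
        have hmul : (pvMV V (s ++ [x]) + 1) * (pvT ns + 2) ≤ pvMV V s * (pvT ns + 2) :=
          Nat.mul_le_mul_right _ (by omega)
        rw [Nat.succ_mul] at hmul
        have hinv : ∀ y ∈ q' ++ (pvAdj ns x).filter (fun n => pvKeep rm x n), y ∈ V := by
          intro y hy
          rcases List.mem_append.mp hy with h1 | h1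
          · exact hq' y h1
          · exact hV y (pvAdj_subset ns x y (List.mem_of_mem_filter h1))
        refine ih g0 g0' (s ++ [x]) _ hinv ?_ ?_ ?_ <;>
          simp only [List.length_append] <;> omega

theorem pv_sim (ns : List (String × List String)) (rm : List (String × String))
    (V : List String) (hV : ∀ n ∈ ns.flatMap (fun p => p.2), n ∈ V) (gb : Nat) :
    ∀ (k g g' : Nat) (s q c : List String), (∀ x ∈ q, x ∈ V) → (∀ x ∈ c, x ∈ V) →
      pvMV V s * (pvT ns + 2) + (q ++ c).length ≤ k →
      pvMV V s * (pvT ns + 2) + (q ++ c).length < g →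
      pvMV V s * (pvT ns + 2) + (q ++ c).length < g' →
      pvMV V s < gb →
      pvLoopA ns rm g s (q ++ c)
        = pvLoopA ns rm g' (c.reverse.foldl (fun a x => pvVisitOld ns rm gb a x) s) q := by
  intro k
  induction k with
  | zero =>
    intro g g' s q c hq hc hk hg hg' hgb
    have h0 : q = [] ∧ c = [] := by
      constructor <;> refine List.eq_nil_of_length_eq_zero ?_ <;>
        simp only [List.length_append] at hk <;> omega
    obtain ⟨rfl, rfl⟩ := h0
    simp only [List.reverse_nil, List.foldl_nil, List.append_nil]
    rw [loopA_nil, loopA_nil]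
  | succ k ih =>
    intro g g' s q c hq hc hk hg hg' hgb
    rcases List.eq_nil_or_concat c with rfl | ⟨c₀, x, rfl⟩
    · simp only [List.reverse_nil, List.foldl_nil, List.append_nil] at *
      exact loopA_stable ns rm V hV (k + 1) g g' s q hq hk hg hg'
    · simp only [List.concat_eq_append] at hc hk hg hg' ⊢
      have hx : x ∈ V := hc x (by simp)
      have hc₀ : ∀ y ∈ c₀, y ∈ V := fun y hy => hc y (by simp [hy])
      obtain ⟨g0, rfl⟩ : ∃ g0, g = g0 + 1 :=
        ⟨g - 1, by simp only [List.length_append] at hg; omega⟩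
      obtain ⟨gb0, rfl⟩ : ∃ gb0, gb = gb0 + 1 := ⟨gb - 1, by omega⟩
      rw [← List.append_assoc]
      simp only [pvLoopA, pv_pop_concat, List.reverse_append, List.reverse_singleton,
        List.singleton_append, List.foldl_cons]
      by_cases hcx : s.contains x = true
      · rw [if_pos hcx]
        have hvx : pvVisitOld ns rm (gb0 + 1) s x = s := by
          simp only [pvVisitOld]; rw [if_pos hcx]
        rw [hvx]
        refine ih g0 g' s q c₀ hq hc₀ ?_ ?_ ?_ hgb <;>
          simp only [List.length_append, List.length_cons] at hk hg hg' ⊢ <;> omega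
      · rw [if_neg hcx, pv_add_fresh s x (by simpa using hcx)]
        have hlt : pvMV V (s ++ [x]) < pvMV V s :=
          pvMV_concat_lt V s x hx (by simpa using hcx)
        have hch : ((pvAdj ns x).filter (fun n => pvKeep rm x n)).length ≤ pvT ns :=
          le_trans (List.length_filter_le _ _) (pvAdj_len ns x)
        have hmul : (pvMV V (s ++ [x]) + 1) * (pvT ns + 2) ≤ pvMV V s * (pvT ns + 2) :=
          Nat.mul_le_mul_right _ (by omega)
        rw [Nat.succ_mul] at hmul
        have hinv : ∀ y ∈ c₀ ++ (pvAdj ns x).filter (fun n => pvKeep rm x n), y ∈ V := by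
          intro y hy
          rcases List.mem_append.mp hy with h1 | h1
          · exact hc₀ y h1
          · exact hV y (pvAdj_subset ns x y (List.mem_of_mem_filter h1))
        rw [List.append_assoc]
        have step := ih g0 g' (s ++ [x]) q (c₀ ++ (pvAdj ns x).filter (fun n => pvKeep rm x n))
          hq hinv
          (by simp only [List.length_append, List.length_cons, List.length_nil] at hk ⊢; omega)
          (by simp only [List.length_append, List.length_cons, List.length_nil] at hg ⊢; omega)
          (by simp only [List.length_append, List.length_cons, List.length_nil] at hg' ⊢; omega)
          (by omega)
        rw [step]
        congr 1
        rw [List.reverse_append, List.foldl_append]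
        congr 1
        have hvisit : pvVisitOld ns rm (gb0 + 1) s x
            = ((pvAdj ns x).filter (fun n => pvKeep rm x n)).reverse.foldl
                (fun a n => pvVisitOld ns rm (gb0 + 1) a n) (s ++ [x]) := by
          simp only [pvVisitOld]
          rw [if_neg hcx, pv_add_fresh s x (by simpa using hcx)]
          rw [foldVisit_filter]
          refine foldVisit_stable ns rm V hV gb0 (gb0 + 1) _ _ ?_ (by omega) (by omega)
          intro n hn
          exact hV n (pvAdj_subset ns x n (List.mem_of_mem_filter (List.mem_reverse.mp hn)))
        rw [hvisit]

-- A's loop computes the reference DFS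
theorem A_eq_visit (ns : List (String × List String)) (start : String) (rm : List (String × String)) :
    find_connected ns start rm = pvVisitOld ns rm ((pvV ns start).length + 1) [] start := by
  unfold find_connected
  have hV : ∀ n ∈ ns.flatMap (fun p => p.2), n ∈ pvV ns start := by
    intro n hn; exact List.mem_cons_of_mem _ hn
  have hmv : pvMV (pvV ns start) [] = (pvV ns start).length := pvMV_nil _
  have h := pv_sim ns rm (pvV ns start) hV ((pvV ns start).length + 1)
    ((pvV ns start).length * (pvT ns + 2) + 1)
    ((pvV ns start).length * (pvT ns + 2) + 2)
    ((pvV ns start).length * (pvT ns + 2) + 2)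
    [] [] [start]
    (by intro x hx; cases hx)
    (by intro x hx; simp only [List.mem_singleton] at hx; subst hx; exact List.mem_cons_self ..)
    (by simp [hmv]) (by simp [hmv]) (by simp [hmv]) (by simp [hmv])
  simp only [List.nil_append] at h
  rw [h]
  simp only [List.reverse_singleton, List.foldl_cons, List.foldl_nil]
  exact loopA_nil ..

-- ===== B-side bridging lemmas =====

theorem sorted_two (a b : String) :
    PySem.List.sorted [a, b] (fun x => x.toList) false
      = if b.toList < a.toList then [b, a] else [a, b] := by
  simp [PySem.List.sorted, PySem.List.insertBy]

theorem pair_eq (c n : String) : (pvMinS c n, pvMaxS c n) = pvEdgeKey c n := by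
  unfold pvEdgeKey pvMinS pvMaxS
  rw [sorted_two]
  rcases lt_trichotomy n.toList c.toList with h | h | h
  · rw [if_pos h, if_pos h, if_neg (asymm h)]
  · have hnc : n = c := String.toList_injective h
    subst hnc
    simp
  · rw [if_neg (asymm h), if_neg (asymm h), if_pos h]

theorem keepB_eq (rm : List (String × String)) (c n : String) :
    pvKeepB rm c n = pvKeep rm c n := by
  unfold pvKeepB pvKeep
  rw [pair_eq]

theorem adjB_eq (ns : List (String × List String)) (c : String) :
    pvAdjB ns c = pvAdj ns c := rfl

theorem ofList_single (s : String) : PySem.Set.ofList [s] = [s] := rfl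

theorem visitOld_contains (ns : List (String × List String)) (rm : List (String × String))
    (g : Nat) (s : List String) (n : String) (h : s.contains n = true) :
    pvVisitOld ns rm g s n = s := by
  cases g with
  | zero => rfl
  | succ g => simp only [pvVisitOld]; rw [if_pos h]

theorem runB_nil (ns : List (String × List String)) (rm : List (String × String))
    (f : Nat) (s : List String) : pvRunB ns rm f s [] = s := by
  cases f with
  | zero => rfl
  | succ f => rfl

theorem pvSW_pos (c : String) (p : List String) (rest : List (String × List String)) :
    1 ≤ pvSW ((c, p) :: rest) := by
  simp [pvSW]; omega

theorem runB_stable (ns : List (String × List String)) (rm : List (String × String))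
    (V : List String) (hV : ∀ n ∈ ns.flatMap (fun p => p.2), n ∈ V) :
    ∀ (k g g' : Nat) (s : List String) (st : List (String × List String)),
      (∀ fr ∈ st, ∀ x ∈ fr.2, x ∈ V) →
      pvMV V s * (pvT ns + 2) + pvSW st ≤ k →
      pvMV V s * (pvT ns + 2) + pvSW st < g →
      pvMV V s * (pvT ns + 2) + pvSW st < g' →
      pvRunB ns rm g s st = pvRunB ns rm g' s st := by
  intro k
  induction k with
  | zero =>
    intro g g' s st hst hk _ _
    cases st with
    | nil => rw [runB_nil, runB_nil]
    | cons fr rest =>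
      obtain ⟨c, p⟩ := fr
      exfalso
      have := pvSW_pos c p rest
      omega
  | succ k ih =>
    intro g g' s st hst hk hg hg'
    cases st with
    | nil => rw [runB_nil, runB_nil]
    | cons fr rest =>
      obtain ⟨c, p⟩ := fr
      have hpos := pvSW_pos c p rest
      obtain ⟨g0, rfl⟩ : ∃ g0, g = g0 + 1 := ⟨g - 1, by omega⟩
      obtain ⟨g0', rfl⟩ : ∃ g0', g' = g0' + 1 := ⟨g' - 1, by omega⟩
      have hrest : ∀ fr ∈ rest, ∀ x ∈ fr.2, x ∈ V :=
        fun fr hf => hst fr (List.mem_cons_of_mem _ hf)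
      rcases List.eq_nil_or_concat p with rfl | ⟨p₀, n, rfl⟩
      · simp only [pvRunB, pv_pop_nil]
        refine ih g0 g0' s rest hrest ?_ ?_ ?_ <;> simp only [pvSW, List.map_cons, List.sum_cons] at hk hg hg' ⊢ <;> omega
      · simp only [List.concat_eq_append] at hst hk hg hg' ⊢
        have hn : n ∈ V := hst (c, p₀ ++ [n]) (List.mem_cons_self ..) n (by simp)
        have hp₀ : ∀ x ∈ p₀, x ∈ V := fun x hx => hst (c, p₀ ++ [n]) (List.mem_cons_self ..) x (by simp [hx])
        have hsw : pvSW ((c, p₀ ++ [n]) :: rest) = pvSW ((c, p₀) :: rest) + 1 := by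
          simp [pvSW]; omega
        simp only [pvRunB, pv_pop_concat]
        by_cases hcond : (pvKeepB rm c n && !(s.contains n)) = true
        · rw [if_pos hcond, if_pos hcond]
          have hfresh : s.contains n = false := by
            have h2 := hcond
            simp only [Bool.and_eq_true, Bool.not_eq_true'] at h2
            exact h2.2
          rw [pv_add_fresh s n hfresh]
          have hlt : pvMV V (s ++ [n]) < pvMV V s := pvMV_concat_lt V s n hn hfresh
          have hadjlen : (pvAdjB ns n).length ≤ pvT ns := pvAdj_len ns n
          have hmul : (pvMV V (s ++ [n]) + 1) * (pvT ns + 2) ≤ pvMV V s * (pvT ns + 2) :=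
            Nat.mul_le_mul_right _ (by omega)
          rw [Nat.succ_mul] at hmul
          have hsw2 : pvSW ((n, pvAdjB ns n) :: (c, p₀) :: rest)
              = (pvAdjB ns n).length + 1 + pvSW ((c, p₀) :: rest) := by
            simp [pvSW]
          have hinv : ∀ fr ∈ (n, pvAdjB ns n) :: (c, p₀) :: rest, ∀ x ∈ fr.2, x ∈ V := by
            intro fr hf x hx
            rcases List.mem_cons.mp hf with rfl | hf'
            · exact hV x (pvAdj_subset ns n x hx)
            · rcases List.mem_cons.mp hf' with rfl | hf''
              · exact hp₀ x hx
              · exact hrest fr hf'' x hx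
          refine ih g0 g0' (s ++ [n]) _ hinv ?_ ?_ ?_ <;>
            rw [hsw2] <;> rw [hsw] at hk hg hg' <;> omega
        · rw [if_neg hcond, if_neg hcond]
          have hinv : ∀ fr ∈ (c, p₀) :: rest, ∀ x ∈ fr.2, x ∈ V := by
            intro fr hf x hx
            rcases List.mem_cons.mp hf with rfl | hf'
            · exact hp₀ x hx
            · exact hrest fr hf' x hx
          refine ih g0 g0' s _ hinv ?_ ?_ ?_ <;> rw [hsw] at hk hg hg' <;> omega

-- the machine processes the top frame exactly like the reference DFS processes that node
theorem run_sim (ns : List (String × List String)) (rm : List (String × String))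
    (V : List String) (hV : ∀ n ∈ ns.flatMap (fun p => p.2), n ∈ V) :
    ∀ (k gOld f f' : Nat) (s : List String) (c : String) (p : List String)
      (rest : List (String × List String)),
      (∀ x ∈ p, x ∈ V) → (∀ fr ∈ rest, ∀ x ∈ fr.2, x ∈ V) →
      pvMV V s * (pvT ns + 2) + pvSW ((c, p) :: rest) ≤ k →
      pvMV V s * (pvT ns + 2) + pvSW ((c, p) :: rest) < f →
      pvMV V s * (pvT ns + 2) + pvSW ((c, p) :: rest) < f' →
      pvMV V s < gOld →
      pvRunB ns rm f s ((c, p) :: rest)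
        = pvRunB ns rm f'
            (p.reverse.foldl (fun a n => if pvKeep rm c n then pvVisitOld ns rm gOld a n else a) s)
            rest := by
  intro k
  induction k with
  | zero =>
    intro gOld f f' s c p rest _ _ hk _ _ _
    exfalso
    have := pvSW_pos c p rest
    omega
  | succ k ih =>
    intro gOld f f' s c p rest hp hrest hk hf hf' hgOld
    have hpos := pvSW_pos c p rest
    obtain ⟨f0, rfl⟩ : ∃ f0, f = f0 + 1 := ⟨f - 1, by omega⟩
    rcases List.eq_nil_or_concat p with rfl | ⟨p₀, n, rfl⟩
    · simp only [pvRunB, pv_pop_nil, List.reverse_nil, List.foldl_nil]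
      refine runB_stable ns rm V hV k f0 f' s rest hrest ?_ ?_ ?_ <;>
        simp only [pvSW, List.map_cons, List.sum_cons] at hk hf hf' ⊢ <;> omega
    · simp only [List.concat_eq_append] at hp hk hf hf' ⊢
      have hn : n ∈ V := hp n (by simp)
      have hp₀ : ∀ x ∈ p₀, x ∈ V := fun x hx => hp x (by simp [hx])
      have hsw : pvSW ((c, p₀ ++ [n]) :: rest) = pvSW ((c, p₀) :: rest) + 1 := by
        simp [pvSW]; omega
      simp only [pvRunB, pv_pop_concat]
      rw [keepB_eq]
      have hfold : (p₀ ++ [n]).reverse.foldl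
          (fun a m => if pvKeep rm c m then pvVisitOld ns rm gOld a m else a) s
          = p₀.reverse.foldl (fun a m => if pvKeep rm c m then pvVisitOld ns rm gOld a m else a)
              (if pvKeep rm c n then pvVisitOld ns rm gOld s n else s) := by
        simp [List.reverse_append]
      rw [hfold]
      by_cases hkp : pvKeep rm c n = true
      · by_cases hcn : s.contains n = true
        · -- kept edge to an already-seen node: both sides skip it
          rw [if_neg (show ¬ ((pvKeep rm c n && !s.contains n) = true) by rw [hkp, hcn]; simp),
            if_pos hkp, visitOld_contains ns rm gOld s n hcn]
          refine ih gOld f0 f' s c p₀ rest hp₀ hrest ?_ ?_ ?_ hgOld <;>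
            rw [hsw] at hk hf hf' <;> omega
        · -- kept edge to a fresh node: the machine pushes a frame, the DFS recurses
          have hfresh : s.contains n = false := by simpa using hcn
          rw [if_pos (show (pvKeep rm c n && !s.contains n) = true by rw [hkp, hfresh]; rfl)]
          rw [if_pos hkp]
          have hlt : pvMV V (s ++ [n]) < pvMV V s := pvMV_concat_lt V s n hn hfresh
          obtain ⟨g0, rfl⟩ : ∃ g0, gOld = g0 + 1 := ⟨gOld - 1, by omega⟩
          have hadjV : ∀ x ∈ pvAdjB ns n, x ∈ V := by
            intro x hx
            exact hV x (pvAdj_subset ns n x hx)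
          have hadjlen : (pvAdjB ns n).length ≤ pvT ns := pvAdj_len ns n
          have hmul : (pvMV V (s ++ [n]) + 1) * (pvT ns + 2) ≤ pvMV V s * (pvT ns + 2) :=
            Nat.mul_le_mul_right _ (by omega)
          rw [Nat.succ_mul] at hmul
          have hswpush : pvSW ((n, pvAdjB ns n) :: (c, p₀) :: rest)
              = (pvAdjB ns n).length + 1 + pvSW ((c, p₀) :: rest) := by
            simp [pvSW]
          have hrest' : ∀ fr ∈ (c, p₀) :: rest, ∀ x ∈ fr.2, x ∈ V := by
            intro fr hf2 x hx
            rcases List.mem_cons.mp hf2 with rfl | hf3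
            · exact hp₀ x hx
            · exact hrest fr hf3 x hx
          have hmeas : pvMV V (s ++ [n]) * (pvT ns + 2) + pvSW ((n, pvAdjB ns n) :: (c, p₀) :: rest) ≤ k := by
            rw [hswpush]; rw [hsw] at hk; omega
          rw [pv_add_fresh s n hfresh]
          -- step 1: consume the pushed frame
          have h1 := ih g0 f0 k (s ++ [n]) n (pvAdjB ns n) ((c, p₀) :: rest)
            hadjV hrest' hmeas (by rw [hsw] at hf; omega) (by omega)
            (by omega)
          rw [h1]
          -- the fold over the pushed frame is exactly one DFS visit of n
          have hvisit : (pvAdjB ns n).reverse.foldl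
              (fun a m => if pvKeep rm n m then pvVisitOld ns rm g0 a m else a) (s ++ [n])
              = pvVisitOld ns rm (g0 + 1) s n := by
            simp only [pvVisitOld]
            rw [if_neg (show ¬ (s.contains n = true) by rw [hfresh]; simp), pv_add_fresh s n hfresh, adjB_eq]
          rw [hvisit]
          -- step 2: continue with the remaining pending entries of the current frame
          have hseen : pvMV V (pvVisitOld ns rm (g0 + 1) s n) ≤ pvMV V (s ++ [n]) := by
            have hpre : (s ++ [n]) <+: pvVisitOld ns rm (g0 + 1) s n := by
              have := visitOld_prefix ns rm (g0 + 1) s n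
              rcases this with ⟨u, hu⟩
              -- pvVisitOld extends s; refine to s ++ [n] via its unfolding
              simp only [pvVisitOld] at hu ⊢
              rw [if_neg (show ¬ (s.contains n = true) by rw [hfresh]; simp)] at hu ⊢
              rw [pv_add_fresh s n hfresh] at hu ⊢
              have hfoldpre : ∀ (l : List String) (a : List String),
                  a <+: l.foldl (fun acc m => if pvKeep rm n m then pvVisitOld ns rm g0 acc m else acc) a := by
                intro l
                induction l with
                | nil => intro a; exact List.prefix_refl a
                | cons m t iht =>
                  intro a
                  simp only [List.foldl_cons]
                  refine List.IsPrefix.trans ?_ (iht _)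
                  by_cases hk2 : pvKeep rm n m = true
                  · rw [if_pos hk2]; exact visitOld_prefix ns rm g0 a m
                  · rw [if_neg hk2]
              exact hfoldpre _ _
            exact pvMV_prefix V _ _ hpre
          refine ih (g0 + 1) k f' (pvVisitOld ns rm (g0 + 1) s n) c p₀ rest hp₀ hrest ?_ ?_ ?_ ?_
          · rw [hsw] at hk
            have : pvMV V (pvVisitOld ns rm (g0+1) s n) * (pvT ns + 2) ≤ pvMV V (s ++ [n]) * (pvT ns + 2) :=
              Nat.mul_le_mul_right _ hseen
            omega
          · have : pvMV V (pvVisitOld ns rm (g0+1) s n) * (pvT ns + 2) ≤ pvMV V (s ++ [n]) * (pvT ns + 2) :=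
              Nat.mul_le_mul_right _ hseen
            rw [hsw] at hk
            omega
          · have : pvMV V (pvVisitOld ns rm (g0+1) s n) * (pvT ns + 2) ≤ pvMV V (s ++ [n]) * (pvT ns + 2) :=
              Nat.mul_le_mul_right _ hseen
            rw [hsw] at hf'
            omega
          · omega
      · -- removed edge: both sides skip it
        have hkpf : pvKeep rm c n = false := by simpa using hkp
        rw [if_neg (show ¬ ((pvKeep rm c n && !s.contains n) = true) by rw [hkpf]; simp),
          if_neg hkp]
        refine ih gOld f0 f' s c p₀ rest hp₀ hrest ?_ ?_ ?_ hgOld <;>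
          rw [hsw] at hk hf hf' <;> omega

theorem pvMV_start (ns : List (String × List String)) (start : String) :
    pvMV (pvV ns start) [start] < (pvV ns start).length := by
  unfold pvMV pvV
  rw [List.countP_cons]
  have h1 : (ns.flatMap (fun p => p.2)).countP (fun x => !([start].contains x))
      ≤ (ns.flatMap (fun p => p.2)).length := List.countP_le_length
  have h2 : (!([start].contains start)) = false := by simp
  rw [h2]
  simp only [List.length_cons, Bool.false_eq_true, if_false]
  omega

-- ===== VERDICT (by name: the statement is the Claim_ definition above) =====
theorem find_connected_spec : Claim_equal_find_connected := by
  intro ns start rm _ _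
  unfold Spec_find_connected
  rw [A_eq_visit]
  have hV : ∀ n ∈ ns.flatMap (fun p => p.2), n ∈ pvV ns start := by
    intro n hn; exact List.mem_cons_of_mem _ hn
  have hstart : pvMV (pvV ns start) [start] < (pvV ns start).length := pvMV_start ns start
  have hadjV : ∀ x ∈ pvAdj ns start, x ∈ pvV ns start := by
    intro x hx
    exact hV x (pvAdj_subset ns start x hx)
  have hadjlen : (pvAdj ns start).length ≤ pvT ns := pvAdj_len ns start
  have hL1 : 1 ≤ (pvV ns start).length := by simp [pvV]
  -- the measure of B's initial state
  have hsw0 : pvSW [(start, pvAdj ns start)] = (pvAdj ns start).length + 1 := by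
    simp [pvSW]
  have hmul : (pvMV (pvV ns start) [start] + 1) * (pvT ns + 2)
      ≤ (pvV ns start).length * (pvT ns + 2) :=
    Nat.mul_le_mul_right _ (by omega)
  rw [Nat.succ_mul] at hmul
  have hfuel : pvFuelB ns start
      = (pvV ns start).length * (pvT ns + 2) + pvT ns + 3 := rfl
  have hmeas : pvMV (pvV ns start) [start] * (pvT ns + 2) + pvSW [(start, pvAdj ns start)]
      < pvFuelB ns start := by
    rw [hsw0, hfuel]
    omega
  -- B's machine run equals the reference DFS
  have hB : find_connected_alt ns start rm
      = (pvAdj ns start).reverse.foldl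
          (fun a n => if pvKeep rm start n then pvVisitOld ns rm ((pvV ns start).length) a n else a)
          [start] := by
    unfold find_connected_alt
    rw [ofList_single, adjB_eq]
    have h := run_sim ns rm (pvV ns start) hV
      (pvMV (pvV ns start) [start] * (pvT ns + 2) + pvSW [(start, pvAdj ns start)])
      ((pvV ns start).length) (pvFuelB ns start)
      (pvMV (pvV ns start) [start] * (pvT ns + 2) + pvSW [(start, pvAdj ns start)] + 1)
      [start] start (pvAdj ns start) []
      hadjV (by intro fr hf; cases hf) (le_refl _) hmeas (by omega) hstart
    rw [h, runB_nil]
  rw [hB]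
  -- A's reference DFS unfolds to the same fold
  obtain ⟨L0, hL⟩ : ∃ L0, (pvV ns start).length = L0 + 1 := ⟨(pvV ns start).length - 1, by omega⟩
  rw [hL]
  simp only [pvVisitOld]
  rw [if_neg (by simp)]
  have hadd : PySem.Set.add ([] : List String) start = [start] := rfl
  rw [hadd]
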